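-- pv_equiv track=rewrite | github.com/dorian68/TradingStrat_mean_reversion | Cls_Strategy.py | lisse_signal
-- ===== SOURCE A (Python) =====
-- def lisse_signal(signals):
--     """
--     Lisse une séquence de signaux en supprimant les répétitions successives.
--     - Conserve 0 (hold)
--     - Ne renvoie un signal non nul que lors d'un changement
--     """
--     smoothed = []
--     prev = 0
--     for s in signals:
--         if s == 0:
--             smoothed.append(0)
--             prev = 0
--         elif s == prev:
--             smoothed.append(0)
--         else:
--             smoothed.append(s)
--             prev = s
--     return smoothed
-- ===== SOURCE B (Python) =====
-- from itertools import groupby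
--
-- def lisse_signal(signals):
--     out = []
--     for v, grp in groupby(signals):
--         n = sum(1 for _ in grp)
--         if v == 0:
--             out.extend([0] * n)
--         else:
--             out.append(v)
--             out.extend([0] * (n - 1))
--     return out
-- ===== Notes on version B (the rewrite author's own statement) =====
-- stated objective: alternative
-- what changed: B walks maximal runs of equal consecutive values with itertools.groupby and emits each run as a block (the value, or nothing for a zero run, followed by zeros), instead of A's element-by-element pass tracking a running prev.
import Mathlib
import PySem

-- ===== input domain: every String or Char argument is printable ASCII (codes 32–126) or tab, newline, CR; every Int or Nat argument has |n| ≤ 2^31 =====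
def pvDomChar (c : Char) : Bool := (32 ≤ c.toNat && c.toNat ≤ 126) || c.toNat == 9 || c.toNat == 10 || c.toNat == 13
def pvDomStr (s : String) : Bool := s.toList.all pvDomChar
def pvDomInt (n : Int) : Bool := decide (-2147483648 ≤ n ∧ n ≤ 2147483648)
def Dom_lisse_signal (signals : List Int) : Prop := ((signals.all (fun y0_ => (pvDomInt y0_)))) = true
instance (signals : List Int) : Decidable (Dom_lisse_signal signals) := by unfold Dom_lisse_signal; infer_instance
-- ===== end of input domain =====

-- B re-groups the signal into maximal runs (groupby) and emits each run as a block,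
-- instead of A's element-by-element pass with a running prev; objective: alternative decomposition.


-- ===== PORT A =====
-- A's loop over `signals` with state `prev`, branches in source order.
def lisseAux (prev : Int) : List Int → List Int
  | [] => []
  | s :: rest =>
    if s = 0 then 0 :: lisseAux 0 rest
    else if s = prev then 0 :: lisseAux prev rest
    else s :: lisseAux s rest

def lisse_signal (signals : List Int) : List Int := lisseAux 0 signals

-- ===== PORT B =====
-- itertools.groupby: the list as maximal runs (value, length).
def groupRuns : List Int → List (Int × Nat)
  | [] => []
  | x :: xs =>
    (x, (xs.takeWhile (· = x)).length + 1) :: groupRuns (xs.dropWhile (· = x))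
termination_by xs => xs.length
decreasing_by
  simp only [List.length_cons]
  exact Nat.lt_succ_of_le (List.length_dropWhile_le _ _)

def runBlock (v : Int) (n : Nat) : List Int :=
  if v = 0 then List.replicate n 0 else v :: List.replicate (n - 1) 0

def lisse_signal_alt (signals : List Int) : List Int :=
  (groupRuns signals).flatMap (fun p => runBlock p.1 p.2)

-- ===== PRECONDITION & SPEC =====
def Spec_lisse_signal (signals : List Int) (out : List Int) : Prop := out = lisse_signal_alt signals
instance (signals : List Int) (out : List Int) : Decidable (Spec_lisse_signal signals out) := by unfold Spec_lisse_signal; infer_instance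

-- ===== CLAIM (what is proved, stated in full; the proofs are below) =====
def Claim_equal_lisse_signal : Prop := ∀ (signals : List Int), Dom_lisse_signal signals → Spec_lisse_signal signals (lisse_signal signals)

-- ===== LEMMAS AND PROOFS =====

-- Inside a run of value v (matching prev), A emits only zeros and keeps prev = v.
theorem lisseAux_run (v : Int) (pre rest : List Int) (h : ∀ a ∈ pre, a = v) :
    lisseAux v (pre ++ rest) = List.replicate pre.length 0 ++ lisseAux v rest := by
  induction pre with
  | nil => simp
  | cons a t ih =>
    have ha : a = v := h a (List.mem_cons_self ..)
    subst ha
    have ih' := ih (fun b hb => h b (List.mem_cons_of_mem _ hb))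
    by_cases hz : a = 0
    · subst hz; simp [lisseAux, ih', List.replicate_succ]
    · simp [lisseAux, hz, ih', List.replicate_succ]

-- Main lemma: if prev cannot swallow the head (head differs from prev, or is 0),
-- A's pass equals B's run-block concatenation.
theorem lisseAux_eq_alt (xs : List Int) (prev : Int)
    (h : ∀ x xt, xs = x :: xt → prev ≠ x ∨ x = 0) :
    lisseAux prev xs = lisse_signal_alt xs := by
  induction hn : xs.length using Nat.strong_induction_on generalizing xs prev with
  | _ n ih =>
  match xs with
  | [] => simp [lisseAux, lisse_signal_alt, groupRuns.eq_def]
  | x :: xt =>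
    have hx := h x xt rfl
    have hsplit : xt = xt.takeWhile (· = x) ++ xt.dropWhile (· = x) :=
      (List.takeWhile_append_dropWhile).symm
    have hmem : ∀ a ∈ xt.takeWhile (· = x), a = x := by
      intro a ha
      simpa using List.mem_takeWhile_imp ha
    have hdroplen : (xt.dropWhile (· = x)).length ≤ xt.length :=
      List.length_dropWhile_le _ _
    have hdrophead : ∀ y yt, xt.dropWhile (· = x) = y :: yt → x ≠ y ∨ y = 0 := by
      intro y yt hdw
      left
      have := List.head?_dropWhile_not (· = x) xt
      rw [hdw] at this
      simp at this
      exact fun hxy => this hxy.symm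
    have ihrest : lisseAux x (xt.dropWhile (· = x)) =
        lisse_signal_alt (xt.dropWhile (· = x)) := by
      refine ih (xt.dropWhile (· = x)).length ?_ _ x hdrophead rfl
      subst hn; simp only [List.length_cons]
      exact Nat.lt_succ_of_le hdroplen
    have hrun : lisseAux x xt =
        List.replicate (xt.takeWhile (· = x)).length 0 ++ lisseAux x (xt.dropWhile (· = x)) := by
      conv_lhs => rw [hsplit]
      exact lisseAux_run x _ _ hmem
    show lisseAux prev (x :: xt) = lisse_signal_alt (x :: xt)
    rw [lisse_signal_alt, groupRuns.eq_def]
    simp only [List.flatMap_cons]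
    by_cases hz : x = 0
    · subst hz
      rw [show lisseAux prev (0 :: xt) = 0 :: lisseAux 0 xt from by simp [lisseAux]]
      rw [hrun, ihrest]
      simp [runBlock, lisse_signal_alt, List.replicate_succ]
    · have hne : prev ≠ x := hx.resolve_right hz
      rw [show lisseAux prev (x :: xt) = x :: lisseAux x xt from by
        simp [lisseAux, hz, Ne.symm hne]]
      rw [hrun, ihrest]
      simp [runBlock, hz, lisse_signal_alt]

-- ===== VERDICT (by name: the statement is the Claim_ definition above) =====
theorem lisse_signal_spec : Claim_equal_lisse_signal := by
  intro signals _
  show lisse_signal signals = lisse_signal_alt signals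
  exact lisseAux_eq_alt signals 0 (fun x xt _ => by
    by_cases hz : x = 0
    · exact Or.inr hz
    · exact Or.inl (fun h => hz h.symm))
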